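-- pv_equiv track=rewrite | github.com/MarcinOrlowski/Mp3VoiceStamp | mp3voicestamp-app/app.py | guess_encoding_quality_for_lame_encoder
-- ===== SOURCE A (Python) =====
-- def guess_encoding_quality_for_lame_encoder(bitrate):
--     # based on https://trac.ffmpeg.org/wiki/Encode/MP3
--     quality = 0
--     for avg in [245, 225, 190, 175, 165, 130, 115, 100, 85, 65]:
--         if bitrate >= avg * 1000:
--             break
--         else:
--             quality += 1
--
--     return quality
-- ===== SOURCE B (Python) =====
-- import bisect
--
-- _THRESHOLDS = [65000, 85000, 100000, 115000, 130000, 165000, 175000, 190000, 225000, 245000]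
--
-- def guess_encoding_quality_for_lame_encoder(bitrate):
--     # quality = number of thresholds strictly greater than bitrate
--     return 10 - bisect.bisect_right(_THRESHOLDS, bitrate)
-- ===== Notes on version B (the rewrite author's own statement) =====
-- stated objective: idiomatic
-- what changed: Replaces the descending linear scan with break by a binary search (bisect_right) over the ascending threshold table, returning 10 minus the insertion point.
import Mathlib
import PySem

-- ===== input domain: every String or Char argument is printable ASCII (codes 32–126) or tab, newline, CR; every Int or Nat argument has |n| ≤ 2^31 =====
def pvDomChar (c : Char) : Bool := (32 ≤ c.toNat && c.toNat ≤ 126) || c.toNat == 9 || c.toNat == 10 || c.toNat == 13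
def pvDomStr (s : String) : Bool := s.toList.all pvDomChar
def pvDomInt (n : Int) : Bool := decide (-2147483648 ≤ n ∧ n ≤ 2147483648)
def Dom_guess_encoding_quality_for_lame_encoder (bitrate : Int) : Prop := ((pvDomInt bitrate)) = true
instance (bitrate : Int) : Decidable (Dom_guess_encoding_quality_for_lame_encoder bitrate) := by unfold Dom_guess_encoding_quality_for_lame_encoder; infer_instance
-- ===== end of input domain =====

-- B replaces A's descending linear scan with a bisect_right binary search over the
-- ascending threshold table (objective: idiomatic); same value on every input.

-- ===== PORT A =====
-- A's for-loop with break: recurse over the descending threshold list carrying quality.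
def pvLoopA (bitrate : Int) : List Int → Int → Int
  | [], q => q
  | avg :: rest, q => if bitrate ≥ avg * 1000 then q else pvLoopA bitrate rest (q + 1)

def guess_encoding_quality_for_lame_encoder (bitrate : Int) : Int :=
  pvLoopA bitrate [245, 225, 190, 175, 165, 130, 115, 100, 85, 65] 0

-- ===== PORT B =====
def pvThresholds : List Int := [65000, 85000, 100000, 115000, 130000, 165000, 175000, 190000, 225000, 245000]

-- bisect.bisect_right: binary search for the insertion point keeping xs sorted, after equals.
def pvBisectRight (xs : List Int) (x : Int) (lo hi : Nat) : Nat :=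
  if _h : lo < hi then
    let mid := (lo + hi) / 2
    if x < xs.getD mid 0 then pvBisectRight xs x lo mid
    else pvBisectRight xs x (mid + 1) hi
  else lo
termination_by hi - lo
decreasing_by all_goals omega

def guess_encoding_quality_for_lame_encoder_alt (bitrate : Int) : Int :=
  10 - (pvBisectRight pvThresholds bitrate 0 pvThresholds.length : Int)

-- ===== PRECONDITION & SPEC =====
def Spec_guess_encoding_quality_for_lame_encoder (bitrate : Int) (out : Int) : Prop := out = guess_encoding_quality_for_lame_encoder_alt bitrate
instance (bitrate : Int) (out : Int) : Decidable (Spec_guess_encoding_quality_for_lame_encoder bitrate out) := by unfold Spec_guess_encoding_quality_for_lame_encoder; infer_instance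

-- ===== CLAIM (what is proved, stated in full; the proofs are below) =====
def Claim_equal_guess_encoding_quality_for_lame_encoder : Prop := ∀ (bitrate : Int), Dom_guess_encoding_quality_for_lame_encoder bitrate → Spec_guess_encoding_quality_for_lame_encoder bitrate (guess_encoding_quality_for_lame_encoder bitrate)

-- ===== LEMMAS AND PROOFS =====

-- ===== VERDICT (by name: the statement is the Claim_ definition above) =====
set_option maxRecDepth 10000 in
theorem guess_encoding_quality_for_lame_encoder_spec : Claim_equal_guess_encoding_quality_for_lame_encoder := by
  intro b _
  unfold Spec_guess_encoding_quality_for_lame_encoder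
  unfold guess_encoding_quality_for_lame_encoder guess_encoding_quality_for_lame_encoder_alt
  simp only [pvLoopA, pvThresholds, List.length]
  simp [pvBisectRight, List.getD]
  split_ifs <;> omega
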